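-- pv_equiv track=rewrite | github.com/risenfromashes/pip-requirements-parser | src/pip_requirements.py | break_args_options
-- ===== SOURCE A (Python) =====
-- from typing import (
--     Any,
--     BinaryIO,
--     Callable,
--     Collection,
--     Dict,
--     FrozenSet,
--     Iterable,
--     Iterator,
--     List,
--     NamedTuple,
--     NewType,
--     Optional,
--     Set,
--     Tuple,
--     Type,
--     Union,
--     cast,
-- )
--
-- def break_args_options(line: str) -> Tuple[str, str]:
--     """Break up the line into an args and options string.  We only want to shlex
--     (and then optparse) the options, not the args.  args can contain markers
--     which are corrupted by shlex.
--     """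
--     tokens = line.split(" ")
--     args = []
--     options = tokens[:]
--     for token in tokens:
--         if token.startswith("-") or token.startswith("--"):
--             break
--         else:
--             args.append(token)
--             options.pop(0)
--     return " ".join(args), " ".join(options)
-- ===== SOURCE B (Python) =====
-- def break_args_options(line):
--     tokens = line.split(" ")
--     idx = next((i for i, t in enumerate(tokens) if t.startswith("-")), len(tokens))
--     return " ".join(tokens[:idx]), " ".join(tokens[idx:])
-- ===== Notes on version B (the rewrite author's own statement) =====
-- stated objective: simpler
-- what changed: B computes a single boundary index (first token starting with '-') and joins the two slices, instead of A's accumulation into an args list with repeated O(n) pop(0) on a copied options list.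
import Mathlib
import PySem

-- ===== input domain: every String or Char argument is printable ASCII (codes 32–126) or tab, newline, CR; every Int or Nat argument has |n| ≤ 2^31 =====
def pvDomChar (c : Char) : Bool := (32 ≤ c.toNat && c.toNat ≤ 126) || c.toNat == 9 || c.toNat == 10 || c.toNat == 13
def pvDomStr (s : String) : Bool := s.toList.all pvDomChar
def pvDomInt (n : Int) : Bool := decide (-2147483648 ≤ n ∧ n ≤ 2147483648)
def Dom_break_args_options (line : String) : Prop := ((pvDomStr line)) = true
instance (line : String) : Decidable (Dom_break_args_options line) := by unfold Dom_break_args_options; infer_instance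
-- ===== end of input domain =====

-- B replaces A's args-accumulation with pop(0) on a copied options list by a single
-- boundary index (first token starting with "-") and two slice joins: simpler decomposition.


-- ===== PORT A =====
-- A's loop: append non-dash tokens to args, pop(0) from the options copy, break at the
-- first dash token.  options.pop(0) is ported as List.drop 1: inside the loop options is
-- always the nonempty remainder of tokens, so Python's pop(0) never raises and drop 1 is exact.
def pvLoopA : List String → List String → List String → List String × List String
  | [], args, options => (args, options)
  | t :: ts, args, options =>
    if PySem.Str.startswith t "-" || PySem.Str.startswith t "--" then (args, options)
    else pvLoopA ts (args ++ [t]) (options.drop 1)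

def break_args_options (line : String) : String × String :=
  -- line.split(" "): sep ≠ "" so Python never raises; split? is some, getD [] never fires
  let tokens := (PySem.Str.split? line " ").getD []
  let r := pvLoopA tokens [] tokens
  (PySem.Str.join " " r.1, PySem.Str.join " " r.2)

-- ===== PORT B =====
def break_args_options_alt (line : String) : String × String :=
  let tokens := (PySem.Str.split? line " ").getD []
  let idx := List.findIdx (fun t => PySem.Str.startswith t "-") tokens
  (PySem.Str.join " " (List.take idx tokens), PySem.Str.join " " (List.drop idx tokens))

-- ===== PRECONDITION & SPEC =====
def Spec_break_args_options (line : String) (out : String × String) : Prop := out = break_args_options_alt line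
instance (line : String) (out : String × String) : Decidable (Spec_break_args_options line out) := by unfold Spec_break_args_options; infer_instance

-- ===== CLAIM (what is proved, stated in full; the proofs are below) =====
def Claim_equal_break_args_options : Prop := ∀ (line : String), Dom_break_args_options line → Spec_break_args_options line (break_args_options line)

-- ===== LEMMAS AND PROOFS =====

-- the '--' test is redundant: a "--" prefix is in particular a "-" prefix
theorem pv_cond_eq (t : String) :
    (PySem.Str.startswith t "-" || PySem.Str.startswith t "--") = PySem.Str.startswith t "-" := by
  simp only [PySem.Str.startswith_eq]
  cases h : PySem.Chars.startswith t.toList ("-".toList) with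
  | true => simp
  | false =>
    simp only [Bool.false_or]
    rw [Bool.eq_false_iff] at h ⊢
    intro h2
    exact h ((PySem.Chars.startswith_iff _ _).mpr
      (List.IsPrefix.trans (by decide) ((PySem.Chars.startswith_iff _ _).mp h2)))

theorem pvLoopA_eq (ts : List String) : ∀ acc : List String,
    pvLoopA ts acc ts =
      (acc ++ ts.take (ts.findIdx (fun t => PySem.Str.startswith t "-")),
       ts.drop (ts.findIdx (fun t => PySem.Str.startswith t "-"))) := by
  induction ts with
  | nil => intro acc; simp [pvLoopA]
  | cons t ts ih =>
    intro acc
    rw [pvLoopA, pv_cond_eq]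
    cases h : PySem.Str.startswith t "-" with
    | true =>
      simp only [PySem.Str.startswith_eq, show ("-" : String).toList = ['-'] from by decide] at h
      simp [List.findIdx_cons, h]
    | false =>
      have h' := h
      simp only [PySem.Str.startswith_eq, show ("-" : String).toList = ['-'] from by decide] at h'
      simp only [Bool.false_eq_true, if_false]
      rw [List.drop_one, List.tail_cons, ih]
      simp [List.findIdx_cons, h']

-- ===== VERDICT (by name: the statement is the Claim_ definition above) =====
theorem break_args_options_spec : Claim_equal_break_args_options := by
  intro line _
  unfold Spec_break_args_options break_args_options break_args_options_alt
  simp only [pvLoopA_eq, List.nil_append]
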